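-- pv_equiv track=rewrite | github.com/scafa-assistant/hivecore-v2 | engine/context_budget.py | select_memories
-- ===== SOURCE A (Python) =====
-- def select_memories(memories: list[dict], budget: int) -> list[dict]:
--     """Waehle Memories nach Relevanz, nicht nur Aktualitaet."""
--     if not memories:
--         return []
--
--     # Neueste 5 IMMER
--     recent = memories[:5]
--     # Rest: nach importance sortieren
--     rest = sorted(
--         memories[5:],
--         key=lambda m: {'high': 3, 'medium': 2, 'low': 1}.get(
--             m.get('importance', 'low'), 0
--         ),
--         reverse=True,
--     )
--
--     selected = list(recent)
--     chars = sum(len(str(m)) for m in selected)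
--     for m in rest:
--         entry_size = len(str(m))
--         if chars + entry_size > budget * 4:
--             break
--         selected.append(m)
--         chars += entry_size
--
--     return selected
-- ===== SOURCE B (Python) =====
-- def select_memories(memories: list[dict], budget: int) -> list[dict]:
--     """Bucket the tail by the four priority levels instead of comparison-sorting it."""
--     recent = memories[:5]
--     hi, med, lo, other = [], [], [], []
--     for m in memories[5:]:
--         imp = m.get('importance', 'low')
--         if imp == 'high':
--             hi.append(m)
--         elif imp == 'medium':
--             med.append(m)
--         elif imp == 'low':
--             lo.append(m)
--         else:
--             other.append(m)
--
--     selected = list(recent)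
--     cap = budget * 4 - sum(len(str(m)) for m in selected)
--     for m in hi + med + lo + other:
--         entry_size = len(str(m))
--         if entry_size > cap:
--             break
--         selected.append(m)
--         cap -= entry_size
--
--     return selected
-- ===== Notes on version B (the rewrite author's own statement) =====
-- stated objective: alternative
-- what changed: Replaces the comparison sort of memories[5:] by a single-pass bucket split over the four priority levels (high/medium/low-or-missing/other) concatenated in descending order, and tracks the remaining character budget instead of the running total in the greedy loop.
import Mathlib
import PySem

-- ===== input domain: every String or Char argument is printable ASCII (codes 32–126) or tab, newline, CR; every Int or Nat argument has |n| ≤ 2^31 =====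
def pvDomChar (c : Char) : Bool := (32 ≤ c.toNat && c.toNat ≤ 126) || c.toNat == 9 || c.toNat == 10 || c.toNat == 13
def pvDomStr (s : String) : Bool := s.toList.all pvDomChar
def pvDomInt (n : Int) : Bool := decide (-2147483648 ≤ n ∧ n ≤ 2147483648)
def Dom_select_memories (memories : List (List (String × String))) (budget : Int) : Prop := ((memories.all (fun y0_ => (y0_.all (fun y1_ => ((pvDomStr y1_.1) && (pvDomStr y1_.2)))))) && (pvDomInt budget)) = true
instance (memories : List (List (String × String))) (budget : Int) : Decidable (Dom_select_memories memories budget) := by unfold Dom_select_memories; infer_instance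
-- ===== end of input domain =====

-- B replaces A's comparison `sorted` of memories[5:] by a single-pass bucket split over the
-- four priority levels (and tracks the remaining character budget instead of the running total).


-- ===== PORT A =====
-- shared helper: len(repr(s)) for a Python str — exact on the stated domain
-- (printable ASCII plus tab/newline/CR): quote is ' unless s contains ' and no ";
-- backslash, the chosen quote, tab, newline and CR print as two characters.
def strReprLen (s : List Char) : Int :=
  let q : Char := if s.contains '\'' && !s.contains '"' then '"' else '\''
  2 + (s.map (fun c =>
    if c = '\\' ∨ c = q ∨ c = Char.ofNat 9 ∨ c = Char.ofNat 10 ∨ c = Char.ofNat 13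
    then (2 : Int) else 1)).sum

-- shared helper: len(str(m)) for a Python dict of strings (insertion order), hand-ported:
-- "{" + ", ".join(repr(k) + ": " + repr(v)) + "}"
def dictStrLen (m : List (String × String)) : Int :=
  if m = [] then 2
  else (m.map (fun kv => strReprLen kv.1.toList + strReprLen kv.2.toList + 4)).sum

-- shared helper: m.get('importance', 'low')
def pyImp (m : List (String × String)) : String :=
  PySem.Dict.getD (PySem.Dict.mk m) "importance" "low"

-- A's sort key: {'high': 3, 'medium': 2, 'low': 1}.get(m.get('importance', 'low'), 0)
def prioA (m : List (String × String)) : Int :=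
  PySem.Dict.getD (PySem.Dict.mk [("high", (3 : Int)), ("medium", 2), ("low", 1)]) (pyImp m) 0

-- A's greedy loop: for m in rest: … break …  (running total `chars`)
def selLoopA (budget : Int) (rest selected : List (List (String × String))) (chars : Int) :
    List (List (String × String)) :=
  match rest with
  | [] => selected
  | m :: t =>
    let entrySize := dictStrLen m
    if chars + entrySize > budget * 4 then selected
    else selLoopA budget t (selected ++ [m]) (chars + entrySize)

def select_memories (memories : List (List (String × String))) (budget : Int) :
    List (List (String × String)) :=
  if memories = [] then []
  else
    let recent := PySem.List.slice memories none (some 5)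
    let rest := PySem.List.sorted (PySem.List.slice memories (some 5) none) prioA true
    let selected := recent
    let chars := (selected.map dictStrLen).sum
    selLoopA budget rest selected chars

-- ===== PORT B =====
-- B's greedy loop: remaining capacity `cap` instead of a running total
def selLoopB (rest selected : List (List (String × String))) (cap : Int) :
    List (List (String × String)) :=
  match rest with
  | [] => selected
  | m :: t =>
    let entrySize := dictStrLen m
    if entrySize > cap then selected
    else selLoopB t (selected ++ [m]) (cap - entrySize)

-- B's loop body: append m to the bucket of its importance level
def bucketStep
    (b : List (List (String × String)) × List (List (String × String)) ×
         List (List (String × String)) × List (List (String × String)))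
    (m : List (String × String)) :
    List (List (String × String)) × List (List (String × String)) ×
    List (List (String × String)) × List (List (String × String)) :=
  let imp := pyImp m
  if imp == "high" then (b.1 ++ [m], b.2.1, b.2.2.1, b.2.2.2)
  else if imp == "medium" then (b.1, b.2.1 ++ [m], b.2.2.1, b.2.2.2)
  else if imp == "low" then (b.1, b.2.1, b.2.2.1 ++ [m], b.2.2.2)
  else (b.1, b.2.1, b.2.2.1, b.2.2.2 ++ [m])

def select_memories_alt (memories : List (List (String × String))) (budget : Int) :
    List (List (String × String)) :=
  let recent := memories.take 5
  let b := (memories.drop 5).foldl bucketStep ([], [], [], [])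
  selLoopB (b.1 ++ b.2.1 ++ b.2.2.1 ++ b.2.2.2) recent
    (budget * 4 - (recent.map dictStrLen).sum)

-- ===== PRECONDITION & SPEC =====
def Spec_select_memories (memories : List (List (String × String))) (budget : Int) (out : List (List (String × String))) : Prop := out = select_memories_alt memories budget
instance (memories : List (List (String × String))) (budget : Int) (out : List (List (String × String))) : Decidable (Spec_select_memories memories budget out) := by unfold Spec_select_memories; infer_instance

-- ===== CLAIM (what is proved, stated in full; the proofs are below) =====
def Claim_equal_select_memories : Prop := ∀ (memories : List (List (String × String))) (budget : Int), Dom_select_memories memories budget → Spec_select_memories memories budget (select_memories memories budget)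


-- ===== LEMMAS AND PROOFS =====

-- A's dict-based key is the if-chain over the importance string
theorem prioA_eq (m : List (String × String)) :
    prioA m = if pyImp m == "high" then 3 else if pyImp m == "medium" then 2
              else if pyImp m == "low" then 1 else 0 := by
  simp only [prioA, PySem.Dict.getD]
  generalize pyImp m = s
  rw [PySem.Dict.get?_mk_cons, PySem.Dict.get?_mk_cons, PySem.Dict.get?_mk_cons]
  by_cases h3 : s = "high"
  · simp [h3]
  · by_cases h2 : s = "medium"
    · simp [h2]
    · by_cases h1 : s = "low"
      · simp [h1]
      · simp [PySem.Dict.get?, Ne.symm h3, Ne.symm h2, Ne.symm h1, h3, h2, h1]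

theorem prio_cases (m : List (String × String)) :
    prioA m = 3 ∨ prioA m = 2 ∨ prioA m = 1 ∨ prioA m = 0 := by
  rw [prioA_eq]; split_ifs <;> simp

-- the two greedy loops agree when cap = budget*4 - chars
theorem selLoopB_eq_selLoopA (budget : Int) (rest : List (List (String × String))) :
    ∀ selected chars, selLoopB rest selected (budget * 4 - chars) = selLoopA budget rest selected chars := by
  induction rest with
  | nil => intro selected chars; rfl
  | cons m t ih =>
    intro selected chars
    simp only [selLoopB, selLoopA]
    by_cases h : chars + dictStrLen m > budget * 4
    · have h' : dictStrLen m > budget * 4 - chars := by omega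
      simp [h, h']
    · have h' : ¬ dictStrLen m > budget * 4 - chars := by omega
      simp only [h, h', if_false]
      have : budget * 4 - chars - dictStrLen m = budget * 4 - (chars + dictStrLen m) := by ring
      rw [this, ih]

-- insertBy passes over a prefix none of whose elements it is "before"
theorem insertBy_append_not_before {a : Type} (before : a → a → Bool) (x : a)
    (ys zs : List a) (h : ∀ y, y ∈ ys → before x y = false) :
    PySem.List.insertBy before x (ys ++ zs) = ys ++ PySem.List.insertBy before x zs := by
  induction ys with
  | nil => simp
  | cons y t ih =>
    have hy : before x y = false := h y (by simp)
    rw [List.cons_append, PySem.List.insertBy.eq_def]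
    simp only [hy, Bool.false_eq_true, if_false]
    rw [ih (fun z hz => h z (by simp [hz]))]
    simp

-- insertBy lands in front of a list all of whose elements it is "before"
theorem insertBy_all_before {a : Type} (before : a → a → Bool) (x : a)
    (zs : List a) (h : ∀ y, y ∈ zs → before x y = true) :
    PySem.List.insertBy before x zs = x :: zs := by
  cases zs with
  | nil => rfl
  | cons z t => simp [PySem.List.insertBy, h z (by simp)]

-- invariant of the insertion sort: buckets of keys 3,2,1,0, each extended at its end
theorem foldl_insertBy_buckets (l : List (List (String × String))) :
    ∀ (a3 a2 a1 a0 : List (List (String × String))),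
    (∀ m, m ∈ a3 → prioA m = 3) → (∀ m, m ∈ a2 → prioA m = 2) →
    (∀ m, m ∈ a1 → prioA m = 1) → (∀ m, m ∈ a0 → prioA m = 0) →
    l.foldl (fun acc x => PySem.List.insertBy (fun a b => decide (prioA b < prioA a)) x acc)
      (a3 ++ (a2 ++ (a1 ++ a0)))
    = (a3 ++ l.filter (fun m => prioA m == 3)) ++ ((a2 ++ l.filter (fun m => prioA m == 2))
      ++ ((a1 ++ l.filter (fun m => prioA m == 1)) ++ (a0 ++ l.filter (fun m => prioA m == 0)))) := by
  induction l with
  | nil => intro a3 a2 a1 a0 _ _ _ _; simp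
  | cons m t ih =>
    intro a3 a2 a1 a0 h3 h2 h1 h0
    rw [List.foldl_cons]
    rcases prio_cases m with hp | hp | hp | hp
    · have hins : PySem.List.insertBy (fun a b => decide (prioA b < prioA a)) m
          (a3 ++ (a2 ++ (a1 ++ a0))) = (a3 ++ [m]) ++ (a2 ++ (a1 ++ a0)) := by
        rw [insertBy_append_not_before _ _ _ _ (by intro y hy; simp [h3 y hy, hp]),
            insertBy_all_before _ _ _ (by
              intro y hy
              have hlt : prioA y < prioA m := by
                simp only [List.mem_append] at hy
                rcases hy with hy | hy | hy
                · simp [h2 y hy, hp]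
                · simp [h1 y hy, hp]
                · simp [h0 y hy, hp]
              simp [hlt])]
        simp
      rw [hins, ih (a3 ++ [m]) a2 a1 a0
        (by intro y hy; rcases List.mem_append.mp hy with hy | hy
            · exact h3 y hy
            · simp at hy; subst hy; exact hp) h2 h1 h0]
      simp [hp, List.append_assoc]
    · have hins : PySem.List.insertBy (fun a b => decide (prioA b < prioA a)) m
          (a3 ++ (a2 ++ (a1 ++ a0))) = a3 ++ ((a2 ++ [m]) ++ (a1 ++ a0)) := by
        rw [insertBy_append_not_before _ _ _ _ (by intro y hy; simp [h3 y hy, hp]),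
            insertBy_append_not_before _ _ _ _ (by intro y hy; simp [h2 y hy, hp]),
            insertBy_all_before _ _ _ (by
              intro y hy
              have hlt : prioA y < prioA m := by
                simp only [List.mem_append] at hy
                rcases hy with hy | hy
                · simp [h1 y hy, hp]
                · simp [h0 y hy, hp]
              simp [hlt])]
        simp
      rw [hins, ih a3 (a2 ++ [m]) a1 a0 h3
        (by intro y hy; rcases List.mem_append.mp hy with hy | hy
            · exact h2 y hy
            · simp at hy; subst hy; exact hp) h1 h0]
      simp [hp, List.append_assoc]
    · have hins : PySem.List.insertBy (fun a b => decide (prioA b < prioA a)) m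
          (a3 ++ (a2 ++ (a1 ++ a0))) = a3 ++ (a2 ++ ((a1 ++ [m]) ++ a0)) := by
        rw [insertBy_append_not_before _ _ _ _ (by intro y hy; simp [h3 y hy, hp]),
            insertBy_append_not_before _ _ _ _ (by intro y hy; simp [h2 y hy, hp]),
            insertBy_append_not_before _ _ _ _ (by intro y hy; simp [h1 y hy, hp]),
            insertBy_all_before _ _ _ (by intro y hy; simp [h0 y hy, hp])]
        simp
      rw [hins, ih a3 a2 (a1 ++ [m]) a0 h3 h2
        (by intro y hy; rcases List.mem_append.mp hy with hy | hy
            · exact h1 y hy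
            · simp at hy; subst hy; exact hp) h0]
      simp [hp, List.append_assoc]
    · have hins : PySem.List.insertBy (fun a b => decide (prioA b < prioA a)) m
          (a3 ++ (a2 ++ (a1 ++ a0))) = a3 ++ (a2 ++ (a1 ++ (a0 ++ [m]))) := by
        rw [PySem.List.insertBy_of_forall_not_before]
        · simp
        · intro y hy
          have : prioA y = 3 ∨ prioA y = 2 ∨ prioA y = 1 ∨ prioA y = 0 := prio_cases y
          simp only [List.mem_append] at hy
          rcases hy with hy | hy | hy | hy
          · simp [h3 y hy, hp]
          · simp [h2 y hy, hp]
          · simp [h1 y hy, hp]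
          · simp [h0 y hy, hp]
      rw [hins, ih a3 a2 a1 (a0 ++ [m]) h3 h2 h1
        (by intro y hy; rcases List.mem_append.mp hy with hy | hy
            · exact h0 y hy
            · simp at hy; subst hy; exact hp)]
      simp [hp, List.append_assoc]

-- A's reverse stable sort by the {0,1,2,3}-valued key is the bucket concatenation
theorem sorted_rev_eq_buckets (l : List (List (String × String))) :
    PySem.List.sorted l prioA true
    = l.filter (fun m => prioA m == 3) ++ (l.filter (fun m => prioA m == 2)
      ++ (l.filter (fun m => prioA m == 1) ++ l.filter (fun m => prioA m == 0))) := by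
  rw [PySem.List.sorted_rev_eq_foldl_insertBy]
  have := foldl_insertBy_buckets l [] [] [] [] (by simp) (by simp) (by simp) (by simp)
  simpa using this

-- B's bucket fold computes the four filters
theorem bucket_fold_eq (l : List (List (String × String))) :
    ∀ (a3 a2 a1 a0 : List (List (String × String))),
    l.foldl bucketStep (a3, a2, a1, a0)
    = (a3 ++ l.filter (fun m => prioA m == 3), a2 ++ l.filter (fun m => prioA m == 2),
       a1 ++ l.filter (fun m => prioA m == 1), a0 ++ l.filter (fun m => prioA m == 0)) := by
  induction l with
  | nil => intro a3 a2 a1 a0; simp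
  | cons m t ih =>
    intro a3 a2 a1 a0
    rw [List.foldl_cons]
    by_cases hh3 : pyImp m = "high"
    · have hp : prioA m = 3 := by rw [prioA_eq]; simp [hh3]
      have hstep : bucketStep (a3, a2, a1, a0) m = (a3 ++ [m], a2, a1, a0) := by
        simp [bucketStep, hh3]
      rw [hstep, ih]
      simp [hp]
    · by_cases hh2 : pyImp m = "medium"
      · have hp : prioA m = 2 := by rw [prioA_eq]; simp [hh2]
        have hstep : bucketStep (a3, a2, a1, a0) m = (a3, a2 ++ [m], a1, a0) := by
          simp [bucketStep, hh2]
        rw [hstep, ih]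
        simp [hp]
      · by_cases hh1 : pyImp m = "low"
        · have hp : prioA m = 1 := by rw [prioA_eq]; simp [hh1]
          have hstep : bucketStep (a3, a2, a1, a0) m = (a3, a2, a1 ++ [m], a0) := by
            simp [bucketStep, hh1]
          rw [hstep, ih]
          simp [hp]
        · have hp : prioA m = 0 := by rw [prioA_eq]; simp [hh1, hh2, hh3]
          have hstep : bucketStep (a3, a2, a1, a0) m = (a3, a2, a1, a0 ++ [m]) := by
            simp [bucketStep, hh3, hh2, hh1]
          rw [hstep, ih]
          simp [hp]

-- ===== VERDICT (by name: the statement is the Claim_ definition above) =====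
theorem select_memories_spec : Claim_equal_select_memories := by
  intro memories budget _
  unfold Spec_select_memories
  by_cases hnil : memories = []
  · subst hnil; rfl
  · simp only [select_memories, select_memories_alt, if_neg hnil]
    rw [PySem.List.slice_to memories (b := 5) (by norm_num),
        PySem.List.slice_from memories (a := 5) (by norm_num)]
    simp only [show ((5:Int)).toNat = 5 from rfl]
    rw [sorted_rev_eq_buckets, bucket_fold_eq]
    simp only [List.nil_append]
    rw [← selLoopB_eq_selLoopA]
    simp [List.append_assoc]
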